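-- pv_equiv track=rewrite | github.com/MrBrantCode/unitest_baseline | mut_generate/mist_train_cf/cf_45350/solution.py | reverse_even
-- ===== SOURCE A (Python) =====
-- def reverse_even(s: str):
--     even_chars = s[::2][::-1]
--     output = ''
--     even_index = 0
--
--     for i in range(len(s)):
--         if i % 2 == 0:
--             output += even_chars[even_index]
--             even_index += 1
--         else:
--             output += s[i]
--
--     return output
-- ===== SOURCE B (Python) =====
-- def reverse_even(s: str):
--     chars = list(s)
--     chars[::2] = chars[::2][::-1]
--     return ''.join(chars)
-- ===== Notes on version B (the rewrite author's own statement) =====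
-- stated objective: simpler
-- what changed: Replaces the explicit indexed loop with its parity branch and even_index counter by a single slice assignment on the character list (chars[::2] = chars[::2][::-1]).
import Mathlib
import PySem

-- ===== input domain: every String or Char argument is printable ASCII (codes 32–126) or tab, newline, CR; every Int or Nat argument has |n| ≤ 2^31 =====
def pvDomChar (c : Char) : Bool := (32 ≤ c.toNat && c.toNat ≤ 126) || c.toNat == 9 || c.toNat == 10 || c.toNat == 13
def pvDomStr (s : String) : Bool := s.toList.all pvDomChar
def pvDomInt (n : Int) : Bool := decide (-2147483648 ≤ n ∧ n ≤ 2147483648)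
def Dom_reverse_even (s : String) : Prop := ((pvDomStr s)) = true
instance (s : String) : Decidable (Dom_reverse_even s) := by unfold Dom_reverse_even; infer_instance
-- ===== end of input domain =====

-- B replaces A's indexed loop (parity branch + even_index counter) by one slice assignment
-- chars[::2] = chars[::2][::-1] on the character list: objective 'simpler'.

-- exact hand-port of the slice xs[::2] (step 2 over the whole list), used by both Pythons
def pvEveryOther : List Char → List Char
  | [] => []
  | [c] => [c]
  | c :: _ :: rest => c :: pvEveryOther rest

-- ===== PORT A =====
def reverse_even (s : String) : String :=
  let cs := s.toList
  let even_chars := (pvEveryOther cs).reverse          -- s[::2][::-1]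
  let r := (PySem.List.pyRange 0 (cs.length : Int) 1).foldl
    (fun (st : List Char × Nat) i =>
      if PySem.Int.mod i 2 == 0 then
        -- indices are always in range here, so the .getD default is never used
        (st.1 ++ [(PySem.List.pyGet? even_chars (st.2 : Int)).getD ' '], st.2 + 1)
      else
        (st.1 ++ [(PySem.List.pyGet? cs i).getD ' '], st.2))
    (([] : List Char), (0 : Nat))
  String.ofList r.1

-- ===== PORT B =====
-- exact hand-port of the slice assignment chars[::2] = repl (step 2, replacement of equal length)
def pvSetEvens : List Char → List Char → List Char
  | r :: rs, _ :: c :: cs => r :: c :: pvSetEvens rs cs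
  | r :: _, [_] => [r]
  | _, _ => []

def reverse_even_alt (s : String) : String :=
  let chars := s.toList
  String.ofList (pvSetEvens ((pvEveryOther chars).reverse) chars)

-- ===== PRECONDITION & SPEC =====
def Spec_reverse_even (s : String) (out : String) : Prop := out = reverse_even_alt s
instance (s : String) (out : String) : Decidable (Spec_reverse_even s out) := by unfold Spec_reverse_even; infer_instance

-- ===== CLAIM (what is proved, stated in full; the proofs are below) =====
def Claim_equal_reverse_even : Prop := ∀ (s : String), Dom_reverse_even s → Spec_reverse_even s (reverse_even s)

-- ===== LEMMAS AND PROOFS =====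

-- the loop body of A's port, named for the proofs (definitionally the lambda in reverse_even)
def pvBody (ev cs : List Char) (st : List Char × Nat) (i : Int) : List Char × Nat :=
  if PySem.Int.mod i 2 == 0 then
    (st.1 ++ [(PySem.List.pyGet? ev (st.2 : Int)).getD ' '], st.2 + 1)
  else
    (st.1 ++ [(PySem.List.pyGet? cs i).getD ' '], st.2)

theorem pvEveryOther_length : ∀ (xs : List Char), (pvEveryOther xs).length = (xs.length + 1) / 2
  | [] => rfl
  | [c] => by simp [pvEveryOther]
  | c :: d :: rest => by
      simp [pvEveryOther, pvEveryOther_length rest]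
      omega

theorem pvSetEvens_nil (rs : List Char) : pvSetEvens rs [] = [] := by
  cases rs <;> rfl

theorem pvLoopA : ∀ (suf ev pre acc : List Char) (k : Nat),
    pre.length = 2 * k → ev.length = k + (suf.length + 1) / 2 →
    ((PySem.List.pyRange ((2 * k : Nat) : Int) (((pre.length + suf.length : Nat)) : Int) 1).foldl
        (pvBody ev (pre ++ suf)) (acc, k)).1
      = acc ++ pvSetEvens (ev.drop k) suf
  | [], ev, pre, acc, k, hk, hev => by
      simp only [List.length_nil] at hev
      rw [PySem.List.pyRange_one_eq_nil (by simp [hk])]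
      simp [pvSetEvens_nil]
  | [c], ev, pre, acc, k, hk, hev => by
      simp only [List.length_nil, List.length_cons] at hev
      have hlt : k < ev.length := by omega
      have hb : ((pre.length + [c].length : Nat) : Int) = ((2 * k : Nat) : Int) + 1 := by
        push_cast; simp; omega
      rw [hb, PySem.List.pyRange_one_singleton]
      have hdrop : ev.drop k = [ev[k]] := by
        rw [List.drop_eq_getElem_cons hlt]
        have : ev.drop (k + 1) = [] := by
          apply List.drop_eq_nil_of_le; omega
        rw [this]
      simp only [List.foldl, pvBody]
      have hmod : PySem.Int.mod ((2 * k : Nat) : Int) 2 == 0 := by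
        simp [PySem.Int.mod]; try omega
      rw [if_pos hmod]
      simp [PySem.List.pyGet?_natCast, List.getElem?_eq_getElem hlt, hdrop, pvSetEvens]
  | c :: d :: rest, ev, pre, acc, k, hk, hev => by
      simp only [List.length_cons] at hev
      have hlt : k < ev.length := by omega
      have hb1 : ((2 * k : Nat) : Int) < ((pre.length + (c :: d :: rest).length : Nat) : Int) := by
        push_cast; simp; omega
      have hb2 : ((2 * k : Nat) : Int) + 1 < ((pre.length + (c :: d :: rest).length : Nat) : Int) := by
        push_cast; simp; omega
      rw [PySem.List.pyRange_one_cons hb1, PySem.List.pyRange_one_cons hb2]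
      simp only [List.foldl_cons]
      -- first step: even index 2k
      have hmod : PySem.Int.mod ((2 * k : Nat) : Int) 2 == 0 := by
        simp [PySem.Int.mod]; try omega
      have hmod2 : ¬ (PySem.Int.mod (((2 * k : Nat) : Int) + 1) 2 == 0) := by
        simp [PySem.Int.mod]; try omega
      have hget2 : PySem.List.pyGet? (pre ++ c :: d :: rest) (((2 * k : Nat) : Int) + 1) = some d := by
        have : (((2 * k : Nat) : Int) + 1) = ((2 * k + 1 : Nat) : Int) := by push_cast; ring
        rw [this, PySem.List.pyGet?_natCast]
        rw [List.getElem?_append_right (by omega)]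
        have : 2 * k + 1 - pre.length = 1 := by omega
        rw [this]; rfl
      simp only [pvBody, if_pos hmod, if_neg hmod2, hget2,
        PySem.List.pyGet?_natCast, List.getElem?_eq_getElem hlt, Option.getD_some]
      have ih := pvLoopA rest ev (pre ++ [c, d]) (acc ++ [ev[k]] ++ [d]) (k + 1)
        (by simp; omega) (by omega)
      have hstart : ((2 * (k + 1) : Nat) : Int) = ((2 * k : Nat) : Int) + 1 + 1 := by
        push_cast; ring
      have hstop : (((pre ++ [c, d]).length + rest.length : Nat) : Int)
          = ((pre.length + (c :: d :: rest).length : Nat) : Int) := by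
        push_cast; simp; omega
      have hcs : (pre ++ [c, d]) ++ rest = pre ++ c :: d :: rest := by simp
      rw [hstart, hstop, hcs] at ih
      rw [ih]
      have hdrop : ev.drop k = ev[k] :: ev.drop (k + 1) := List.drop_eq_getElem_cons hlt
      rw [hdrop]
      simp [pvSetEvens]

-- ===== VERDICT (by name: the statement is the Claim_ definition above) =====
theorem reverse_even_spec : Claim_equal_reverse_even := by
  unfold Claim_equal_reverse_even
  intro s _
  simp only [Spec_reverse_even, reverse_even, reverse_even_alt]
  have h := pvLoopA s.toList ((pvEveryOther s.toList).reverse) [] [] 0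
    (by simp) (by simp [pvEveryOther_length])
  simp only [Nat.mul_zero, List.nil_append, List.drop_zero, List.length_nil, Nat.zero_add,
    Nat.cast_zero] at h
  exact congrArg String.ofList h
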